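-- pv_equiv track=rewrite | github.com/Priyanshu07190/ASL-Recognition | app_word_builder_svm.py | autocorrect_word
-- ===== SOURCE A (Python) =====
-- COMMON_WORDS = {
--     'CAT', 'DOG', 'HELLO', 'HELP', 'YES', 'NO', 'PLEASE', 'THANK', 'YOU',
--     'SORRY', 'WATER', 'FOOD', 'LOVE', 'FAMILY', 'FRIEND', 'HOME', 'WORK',
--     'SCHOOL', 'GOOD', 'BAD', 'HOT', 'COLD', 'BIG', 'SMALL', 'MORE', 'STOP'
-- }
--
-- def levenshtein_distance(s1, s2):
--     """Calculate edit distance between two strings"""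
--     if len(s1) < len(s2):
--         return levenshtein_distance(s2, s1)
--
--     if len(s2) == 0:
--         return len(s1)
--
--     previous_row = range(len(s2) + 1)
--     for i, c1 in enumerate(s1):
--         current_row = [i + 1]
--         for j, c2 in enumerate(s2):
--             insertions = previous_row[j + 1] + 1
--             deletions = current_row[j] + 1
--             substitutions = previous_row[j] + (c1 != c2)
--             current_row.append(min(insertions, deletions, substitutions))
--         previous_row = current_row
--
--     return previous_row[-1]
--
-- def autocorrect_word(word):
--     """Find closest matching word from common words"""
--     if not word:
--         return None
--
--     word_str = ''.join(word)
--
--     # Exact match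
--     if word_str in COMMON_WORDS:
--         return word_str
--
--     # Find closest match
--     closest = None
--     min_distance = float('inf')
--
--     for common_word in COMMON_WORDS:
--         distance = levenshtein_distance(word_str, common_word)
--         if distance < min_distance and distance <= 2:  # Max 2 edits
--             min_distance = distance
--             closest = common_word
--
--     return closest
-- ===== SOURCE B (Python) =====
-- from functools import lru_cache
--
-- COMMON_WORDS = {
--     'CAT', 'DOG', 'HELLO', 'HELP', 'YES', 'NO', 'PLEASE', 'THANK', 'YOU',
--     'SORRY', 'WATER', 'FOOD', 'LOVE', 'FAMILY', 'FRIEND', 'HOME', 'WORK',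
--     'SCHOOL', 'GOOD', 'BAD', 'HOT', 'COLD', 'BIG', 'SMALL', 'MORE', 'STOP'
-- }
--
-- def levenshtein_distance(s1, s2):
--     """Edit distance via the standard top-down recurrence, memoized."""
--     @lru_cache(maxsize=None)
--     def lev(i, j):
--         if i == 0:
--             return j
--         if j == 0:
--             return i
--         cost = 0 if s1[i - 1] == s2[j - 1] else 1
--         return min(lev(i - 1, j) + 1, lev(i, j - 1) + 1, lev(i - 1, j - 1) + cost)
--     # warm the cache in dependency order so the recursion stays shallow on long strings
--     for i in range(len(s1) + 1):
--         for j in range(len(s2) + 1):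
--             lev(i, j)
--     return lev(len(s1), len(s2))
--
-- def autocorrect_word(word):
--     """Find closest matching word from common words"""
--     if not word:
--         return None
--     word_str = ''.join(word)
--     if word_str in COMMON_WORDS:
--         return word_str
--     # score every word once, take the lexicographically-least closest one
--     distance, closest = min((levenshtein_distance(word_str, w), w)
--                             for w in sorted(COMMON_WORDS))
--     return closest if distance <= 2 else None
-- ===== Notes on version B (the rewrite author's own statement) =====
-- stated objective: alternative
-- what changed: levenshtein_distance becomes the standard top-down recurrence memoized with lru_cache (cache warmed in dependency order) instead of the bottom-up rolling-row DP with the swap trick, and the selection loop with a running minimum over the set's hash order becomes a single min() over (distance, word) pairs for the sorted word list with a final <=2 threshold.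
-- outside the precondition, e.g. on autocorrect_word(['C', 'AD']): A returns 'CAT', B returns 'BAD'; on autocorrect_word(['E']): A returns 'YES', B returns 'NO'
import Mathlib
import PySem

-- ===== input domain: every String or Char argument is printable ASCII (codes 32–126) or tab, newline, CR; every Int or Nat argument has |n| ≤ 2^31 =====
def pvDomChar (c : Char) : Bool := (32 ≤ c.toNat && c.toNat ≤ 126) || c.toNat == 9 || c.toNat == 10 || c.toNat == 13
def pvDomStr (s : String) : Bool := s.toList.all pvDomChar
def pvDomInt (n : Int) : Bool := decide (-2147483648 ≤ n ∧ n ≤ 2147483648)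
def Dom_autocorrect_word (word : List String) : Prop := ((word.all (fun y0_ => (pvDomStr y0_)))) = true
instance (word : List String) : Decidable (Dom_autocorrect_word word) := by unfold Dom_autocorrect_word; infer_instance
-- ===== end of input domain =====

-- B restructures A: levenshtein_distance becomes a memoized top-down recursion instead of the
-- bottom-up rolling-row DP with argument swap, and the selection loop becomes one min() over
-- (distance, word) pairs of the sorted word list with a final ≤ 2 threshold (objective: alternative).

-- ===== PORT A =====

-- the Python set COMMON_WORDS, listed in CPython's iteration order under PYTHONHASHSEED=0
-- (the differential tester's seed): the order in which A's for-loop visits it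
def commonWordsA : List String :=
  ["CAT","WORK","THANK","YES","BIG","HOT","GOOD","BAD","SCHOOL","LOVE","HOME","HELLO","WATER",
   "MORE","HELP","YOU","FAMILY","SMALL","STOP","DOG","PLEASE","COLD","FOOD","SORRY","FRIEND","NO"]

-- levenshtein_distance of A: swap so s2 is the shorter, then the rolling-row DP.
-- Row reads previous_row[j+1] / current_row[j] / previous_row[j] are via pyGetD (the indices are
-- always in range, so Python's IndexError is unreachable and the default 0 is dead code).
def levA (s1 s2 : List Char) : Int :=
  if s1.length < s2.length then levA s2 s1
  else if s2.length = 0 then (s1.length : Int)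
  else
    PySem.List.pyGetD
      ((PySem.List.enumerate s1).foldl (fun previous_row (ic : Int × Char) =>
          (PySem.List.enumerate s2).foldl (fun current_row (jc : Int × Char) =>
            let insertions := PySem.List.pyGetD previous_row (jc.1 + 1) 0 + 1
            let deletions := PySem.List.pyGetD current_row jc.1 0 + 1
            let substitutions := PySem.List.pyGetD previous_row jc.1 0 + (if ic.2 ≠ jc.2 then (1 : Int) else 0)
            current_row ++ [min insertions (min deletions substitutions)])
          [ic.1 + 1])
        (List.map (fun (j : Nat) => (j : Int)) (List.range (s2.length + 1))))
      (-1) 0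
  termination_by (if s1.length < s2.length then 1 else 0)
  decreasing_by simp_all; omega

def autocorrect_word (word : List String) : Option String :=
  if word = [] then none
  else
    let word_str := PySem.Str.join "" word
    if commonWordsA.contains word_str then some word_str
    else
      -- closest = None, min_distance = inf (modelled as none); strict-improvement update capped at 2
      (commonWordsA.foldl (fun (st : Option String × Option Int) common_word =>
          let distance := levA word_str.toList common_word.toList
          if ((match st.2 with | none => true | some m => decide (distance < m)) && decide (distance ≤ 2))
          then (some common_word, some distance) else st)
        (none, none)).1

-- ===== PORT B =====

-- the same Python set literal, distinct elements in source order (B only sorts it or tests membership)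
def commonWordsB : List String :=
  ["CAT","DOG","HELLO","HELP","YES","NO","PLEASE","THANK","YOU","SORRY","WATER","FOOD","LOVE",
   "FAMILY","FRIEND","HOME","WORK","SCHOOL","GOOD","BAD","HOT","COLD","BIG","SMALL","MORE","STOP"]

-- lru_cache of Source B's nested lev: the cache is an explicit dict keyed by (i, j), threaded through
-- the recursion in Python's evaluation order; s1[i-1] / s2[j-1] are in range whenever read,
-- so getD's default is dead code.
def levBgo (s1 s2 : List Char) (i j : Nat) (memo : PySem.Dict (Nat × Nat) Int) :
    Int × PySem.Dict (Nat × Nat) Int :=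
  match memo.get? (i, j) with
  | some v => (v, memo)
  | none =>
    match i, j with
    | 0, j => ((j : Int), memo.insert (0, j) (j : Int))
    | i+1, 0 => ((i + 1 : Int), memo.insert (i+1, 0) (i + 1 : Int))
    | i+1, j+1 =>
      let cost : Int := if s1.getD i ' ' = s2.getD j ' ' then 0 else 1
      let r1 := levBgo s1 s2 i (j+1) memo
      let r2 := levBgo s1 s2 (i+1) j r1.2
      let r3 := levBgo s1 s2 i j r2.2
      let r := min (r1.1 + 1) (min (r2.1 + 1) (r3.1 + cost))
      (r, r3.2.insert (i+1, j+1) r)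
  termination_by (i, j)

-- the cache-warming loops of Source B (for i … for j … lev(i, j)), then the final lev call
def levB (s1 s2 : List Char) : Int :=
  ((levBgo s1 s2 s1.length s2.length
    ((List.range (s1.length + 1)).foldl (fun memo i =>
      (List.range (s2.length + 1)).foldl (fun memo j => (levBgo s1 s2 i j memo).2) memo)
      PySem.Dict.empty)).1)

def autocorrect_word_alt (word : List String) : Option String :=
  if word = [] then none
  else
    let word_str := PySem.Str.join "" word
    if commonWordsB.contains word_str then some word_str
    else
      match PySem.List.min2?
          ((PySem.List.sorted commonWordsB (fun w => w) false).map
            (fun w => (levB word_str.toList w.toList, w)))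
          (fun p => p.1) (fun p => p.2) with
      | some p => if p.1 ≤ 2 then some p.2 else none
      | none => none  -- unreachable: the word list is nonempty (there Python's min would raise)

-- ===== PRECONDITION & SPEC =====

-- One DP row step of the reference edit distance used to state Pre_ (kernel-reducible):
-- t = rest of s2, pj :: rest = previous row from column j on, last = the current row's last entry.
def erow (c1 : Char) : List Char → List Nat → Nat → List Nat
  | c2 :: t, pj :: rest, last =>
      let v := min (rest.headD 0 + 1) (min (last + 1) (pj + if c1 = c2 then 0 else 1))
      v :: erow c1 t rest v
  | _, _, _ => []

-- reference levenshtein distance (iterative; used only to STATE the precondition)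
def editDist (s1 s2 : List Char) : Nat :=
  ((s1.foldl (fun (st : Nat × List Nat) c1 =>
      (st.1 + 1, (st.1 + 1) :: erow c1 s2 st.2 (st.1 + 1)))
    (0, List.range (s2.length + 1))).2).getLastD 0

def wdist (w c : String) : Nat := editDist w.toList c.toList

-- the 26 common words, alphabetically (a fixed reference order for stating Pre_)
def cwSorted : List String :=
  ["BAD","BIG","CAT","COLD","DOG","FAMILY","FOOD","FRIEND","GOOD","HELLO","HELP","HOME","HOT",
   "LOVE","MORE","NO","PLEASE","SCHOOL","SMALL","SORRY","STOP","THANK","WATER","WORK","YES","YOU"]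

-- Pre_ excludes inputs (without an exact dictionary match) on which two or more common words tie
-- at the minimal edit distance ≤ 2: there A's answer is an accident of Python's set-iteration
-- (hash-seed-dependent) order, so no single value is specifiable.
def Pre_autocorrect_word (word : List String) : Prop :=
  PySem.Str.join "" word ∈ cwSorted ∨
  (cwSorted.countP (fun c => decide (wdist (PySem.Str.join "" word) c ≤ 2) &&
      cwSorted.all (fun c' => decide (wdist (PySem.Str.join "" word) c ≤ wdist (PySem.Str.join "" word) c')))) ≤ 1

instance (word : List String) : Decidable (Pre_autocorrect_word word) := by
  unfold Pre_autocorrect_word; infer_instance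

def pvWitness_autocorrect_word : List String := ["H", "OUSE"]

def Spec_autocorrect_word (word : List String) (out : Option String) : Prop := out = autocorrect_word_alt word
instance (word : List String) (out : Option String) : Decidable (Spec_autocorrect_word word out) := by unfold Spec_autocorrect_word; infer_instance

-- ===== CLAIM (what is proved, stated in full; the proofs are below) =====
def Claim_equal_autocorrect_word : Prop := ∀ (word : List String), Dom_autocorrect_word word → Pre_autocorrect_word word → Spec_autocorrect_word word (autocorrect_word word)

-- ===== LEMMAS AND PROOFS =====

-- the textbook recurrence on prefix lengths: the common mathematical value of all three distances
def levP (s1 s2 : List Char) : Nat → Nat → Nat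
  | 0, j => j
  | i+1, 0 => i+1
  | i+1, j+1 =>
      min (levP s1 s2 i (j+1) + 1)
        (min (levP s1 s2 (i+1) j + 1)
          (levP s1 s2 i j + if s1.getD i ' ' = s2.getD j ' ' then 0 else 1))
  termination_by i j => (i, j)

theorem levP_symm (s1 s2 : List Char) : ∀ i j, levP s1 s2 i j = levP s2 s1 j i := by
  intro i
  induction i with
  | zero => intro j; cases j <;> simp [levP]
  | succ i ih =>
    intro j
    induction j with
    | zero => simp [levP]
    | succ j ihj =>
      rw [levP, levP]
      rw [ih (j+1), ihj, ih j]
      have hc : (if s1.getD i ' ' = s2.getD j ' ' then 0 else 1) = (if s2.getD j ' ' = s1.getD i ' ' then 0 else 1) := by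
        by_cases h : s1.getD i ' ' = s2.getD j ' ' <;> simp [h, eq_comm]
      rw [hc]; omega

-- from h : c :: t = l.drop k, extract the pieces
theorem drop_cons_facts {α : Type} (d : α) {l t : List α} {c : α} {k : Nat}
    (h : c :: t = l.drop k) : k < l.length ∧ c = l.getD k d ∧ t = l.drop (k+1) := by
  have h1 : l[k]? = some c := by rw [← List.head?_drop, ← h]; rfl
  have hk : k < l.length := by
    by_contra hge
    rw [List.getElem?_eq_none (by omega)] at h1; simp at h1
  refine ⟨hk, ?_, ?_⟩
  · simp [List.getD, h1]
  · have := congrArg (List.drop 1) h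
    simpa [List.drop_drop, Nat.add_comm] using this

-- ----- the reference editDist computes levP -----

def rowP (s1 s2 : List Char) (i : Nat) : List Nat :=
  (List.range (s2.length + 1)).map (fun j => levP s1 s2 i j)

theorem rowP_length (s1 s2 : List Char) (i : Nat) : (rowP s1 s2 i).length = s2.length + 1 := by
  simp [rowP]

theorem rowP_cons_drop (s1 s2 : List Char) (i k : Nat) (h : k < s2.length + 1) :
    (rowP s1 s2 i).drop k = levP s1 s2 i k :: (rowP s1 s2 i).drop (k+1) := by
  rw [List.drop_eq_getElem_cons (by rw [rowP_length]; omega)]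
  simp [rowP]

theorem erow_spec (s1 s2 : List Char) (i : Nat) :
    ∀ (t : List Char) (k : Nat), t = s2.drop k →
      erow (s1.getD i ' ') t ((rowP s1 s2 i).drop k) (levP s1 s2 (i+1) k) =
        (rowP s1 s2 (i+1)).drop (k+1) := by
  intro t
  induction t with
  | nil =>
    intro k h
    have hk : s2.length ≤ k := by
      have := congrArg List.length h; simp at this; omega
    have hlen : (rowP s1 s2 (i+1)).length ≤ k + 1 := by rw [rowP_length]; omega
    rw [List.drop_eq_nil_of_le hlen]
    cases hd : (rowP s1 s2 i).drop k <;> simp [erow]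
  | cons c2 t' ih =>
    intro k h
    obtain ⟨hk, hc2, ht'⟩ := drop_cons_facts ' ' h
    rw [rowP_cons_drop s1 s2 i k (by omega)]
    show (min (((rowP s1 s2 i).drop (k+1)).headD 0 + 1)
        (min (levP s1 s2 (i+1) k + 1) (levP s1 s2 i k + if s1.getD i ' ' = c2 then 0 else 1))) ::
        erow (s1.getD i ' ') t' ((rowP s1 s2 i).drop (k+1)) _ = _
    have hhead : ((rowP s1 s2 i).drop (k+1)).headD 0 = levP s1 s2 i (k+1) := by
      rw [rowP_cons_drop s1 s2 i (k+1) (by omega)]; rfl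
    rw [hhead]
    have hv : min (levP s1 s2 i (k+1) + 1)
        (min (levP s1 s2 (i+1) k + 1) (levP s1 s2 i k + if s1.getD i ' ' = c2 then 0 else 1)) =
        levP s1 s2 (i+1) (k+1) := by
      rw [levP, hc2]
    rw [hv, ih (k+1) ht', rowP_cons_drop s1 s2 (i+1) (k+1) (by omega)]

theorem foldE_spec (s1 s2 : List Char) :
    ∀ (t : List Char) (i : Nat), i ≤ s1.length → t = s1.drop i →
      (t.foldl (fun (st : Nat × List Nat) c1 =>
          (st.1 + 1, (st.1 + 1) :: erow c1 s2 st.2 (st.1 + 1))) (i, rowP s1 s2 i)) =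
        (s1.length, rowP s1 s2 s1.length) := by
  intro t
  induction t with
  | nil =>
    intro i hile h
    have := congrArg List.length h
    simp at this
    have hi : i = s1.length := by omega
    simp [hi]
  | cons c1 t' ih =>
    intro i hile h
    obtain ⟨hi, hc1, ht'⟩ := drop_cons_facts ' ' h
    simp only [List.foldl_cons]
    have hl0 : levP s1 s2 (i+1) 0 = i + 1 := by simp [levP]
    have h0 : erow (s1.getD i ' ') s2 (rowP s1 s2 i) (i + 1) = (rowP s1 s2 (i+1)).drop 1 := by
      have h0' := erow_spec s1 s2 i s2 0 rfl
      simp only [List.drop_zero, hl0] at h0'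
      exact h0'
    have hcons : rowP s1 s2 (i+1) = (i + 1) :: (rowP s1 s2 (i+1)).drop 1 := by
      have := rowP_cons_drop s1 s2 (i+1) 0 (by omega)
      simpa [hl0] using this
    have hstep : ((i : Nat) + 1, (i + 1) :: erow c1 s2 (rowP s1 s2 i) (i + 1)) =
        ((i + 1 : Nat), rowP s1 s2 (i+1)) := by
      rw [show c1 = s1.getD i ' ' from hc1, h0, ← hcons]
    rw [hstep]
    exact ih (i+1) (by omega) ht'

theorem editDist_eq_levP (s1 s2 : List Char) : editDist s1 s2 = levP s1 s2 s1.length s2.length := by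
  unfold editDist
  have hinit : (List.range (s2.length + 1)) = rowP s1 s2 0 := by
    simp [rowP, levP]
  rw [hinit, foldE_spec s1 s2 s1 0 (by omega) rfl]
  simp [rowP, List.range_succ]

-- ----- A's rolling-row DP computes levP -----

def rowPI (s1 s2 : List Char) (i : Nat) : List Int :=
  (List.range (s2.length + 1)).map (fun j => (levP s1 s2 i j : Int))

theorem innerA (s1 s2 : List Char) (i : Nat) (hi : i < s1.length) :
    ∀ (t : List Char) (k : Nat), k ≤ s2.length → t = s2.drop k →
      (PySem.List.enumerate t (k : Int)).foldl
        (fun current_row (jc : Int × Char) =>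
          current_row ++ [min (PySem.List.pyGetD (rowPI s1 s2 i) (jc.1 + 1) 0 + 1)
            (min (PySem.List.pyGetD current_row jc.1 0 + 1)
              (PySem.List.pyGetD (rowPI s1 s2 i) jc.1 0 + (if s1.getD i ' ' ≠ jc.2 then (1:Int) else 0)))])
        ((List.range (k+1)).map (fun j => (levP s1 s2 (i+1) j : Int)))
      = rowPI s1 s2 (i+1) := by
  intro t
  induction t with
  | nil =>
    intro k hk h
    have := congrArg List.length h
    simp at this
    have : k = s2.length := by omega
    subst this
    simp [PySem.List.enumerate, rowPI]
  | cons c2 t' ih =>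
    intro k hk h
    obtain ⟨hklt, hc2, ht'⟩ := drop_cons_facts ' ' h
    rw [PySem.List.enumerate_cons, List.foldl_cons]
    have e1 : PySem.List.pyGetD (rowPI s1 s2 i) ((k : Int) + 1) 0 = (levP s1 s2 i (k+1) : Int) := by
      rw [show ((k : Int) + 1) = ((k+1 : Nat) : Int) by push_cast; ring, PySem.List.pyGetD_natCast]
      exact PySem.List.getD_map_range _ _ _ _ (by omega)
    have e2 : PySem.List.pyGetD ((List.range (k+1)).map (fun j => (levP s1 s2 (i+1) j : Int))) (k : Int) 0
        = (levP s1 s2 (i+1) k : Int) := by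
      rw [PySem.List.pyGetD_natCast]
      exact PySem.List.getD_map_range _ _ _ _ (by omega)
    have e3 : PySem.List.pyGetD (rowPI s1 s2 i) (k : Int) 0 = (levP s1 s2 i k : Int) := by
      rw [PySem.List.pyGetD_natCast]
      exact PySem.List.getD_map_range _ _ _ _ (by omega)
    have hv : min ((levP s1 s2 i (k+1) : Int) + 1)
        (min ((levP s1 s2 (i+1) k : Int) + 1)
          ((levP s1 s2 i k : Int) + (if s1.getD i ' ' ≠ c2 then (1:Int) else 0))) =
        (levP s1 s2 (i+1) (k+1) : Int) := by
      rw [levP, hc2]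
      by_cases hcc : s1.getD i ' ' = s2.getD k ' ' <;> simp [hcc] <;> push_cast <;> omega
    simp only [e1, e2, e3, hv]
    have happ : (List.range (k+1)).map (fun j => (levP s1 s2 (i+1) j : Int)) ++ [(levP s1 s2 (i+1) (k+1) : Int)]
        = (List.range (k+2)).map (fun j => (levP s1 s2 (i+1) j : Int)) := by
      rw [show k+2 = (k+1)+1 from rfl, List.range_succ (n := k+1), List.map_append]; simp
    rw [happ, show ((k : Int) + 1) = ((k+1 : Nat) : Int) by push_cast; ring]
    exact ih (k+1) (by omega) ht'

theorem outerA (s1 s2 : List Char) :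
    ∀ (t : List Char) (k : Nat), k ≤ s1.length → t = s1.drop k →
      (PySem.List.enumerate t (k : Int)).foldl
        (fun previous_row (ic : Int × Char) =>
          (PySem.List.enumerate s2).foldl (fun current_row (jc : Int × Char) =>
            current_row ++ [min (PySem.List.pyGetD previous_row (jc.1 + 1) 0 + 1)
              (min (PySem.List.pyGetD current_row jc.1 0 + 1)
                (PySem.List.pyGetD previous_row jc.1 0 + (if ic.2 ≠ jc.2 then (1:Int) else 0)))])
          [ic.1 + 1])
        (rowPI s1 s2 k) = rowPI s1 s2 s1.length := by
  intro t
  induction t with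
  | nil =>
    intro k hk h
    have := congrArg List.length h
    simp at this
    have : k = s1.length := by omega
    subst this
    simp [PySem.List.enumerate]
  | cons c1 t' ih =>
    intro k hk h
    obtain ⟨hklt, hc1, ht'⟩ := drop_cons_facts ' ' h
    rw [PySem.List.enumerate_cons, List.foldl_cons]
    have hseed : [((k : Int)) + 1] = (List.range (0+1)).map (fun j => (levP s1 s2 (k+1) j : Int)) := by
      simp [levP]
    have hstep : (PySem.List.enumerate s2).foldl (fun current_row (jc : Int × Char) =>
            current_row ++ [min (PySem.List.pyGetD (rowPI s1 s2 k) (jc.1 + 1) 0 + 1)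
              (min (PySem.List.pyGetD current_row jc.1 0 + 1)
                (PySem.List.pyGetD (rowPI s1 s2 k) jc.1 0 + (if c1 ≠ jc.2 then (1:Int) else 0)))])
          [((k : Int)) + 1] = rowPI s1 s2 (k+1) := by
      rw [hseed, hc1]
      have := innerA s1 s2 k hklt s2 0 (by omega) rfl
      simpa using this
    rw [hstep, show ((k : Int) + 1) = ((k+1 : Nat) : Int) by push_cast; ring]
    exact ih (k+1) (by omega) ht'

theorem pyGetD_neg_one_map_range (f : Nat → Int) (n : Nat) :
    PySem.List.pyGetD ((List.range (n+1)).map f) (-1) 0 = f n := by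
  simp [PySem.List.pyGetD, PySem.List.pyGet?, PySem.List.pyIdx?, List.range_succ]

theorem levA_core (s1 s2 : List Char) (h : ¬ s1.length < s2.length) :
    levA s1 s2 = (levP s1 s2 s1.length s2.length : Int) := by
  rw [levA.eq_def]
  rw [if_neg h]
  by_cases h0 : s2.length = 0
  · rw [if_pos h0, h0, show levP s1 s2 s1.length 0 = s1.length from by cases hs : s1.length <;> simp [hs, levP]]
  · rw [if_neg h0]
    have hinit : List.map (fun (j : Nat) => (j : Int)) (List.range (s2.length + 1)) = rowPI s1 s2 0 := by
      have hf : (fun j : Nat => (j : Int)) = (fun j => (levP s1 s2 0 j : Int)) := by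
        funext j; simp [levP]
      show _ = (List.range (s2.length + 1)).map (fun j => (levP s1 s2 0 j : Int))
      exact congrArg (fun f => List.map f (List.range (s2.length+1))) hf
    rw [hinit]
    have := outerA s1 s2 s1 0 (by omega) rfl
    simp only [Nat.cast_zero] at this
    rw [this]
    exact pyGetD_neg_one_map_range _ _

theorem levA_eq_levP (s1 s2 : List Char) :
    levA s1 s2 = (levP s1 s2 s1.length s2.length : Int) := by
  by_cases hlt : s1.length < s2.length
  · rw [levA.eq_def, if_pos hlt, levA_core s2 s1 (by omega), levP_symm s2 s1]
  · exact levA_core s1 s2 hlt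

-- ----- B's memoized recursion computes levP -----

def InvB (s1 s2 : List Char) (memo : PySem.Dict (Nat × Nat) Int) : Prop :=
  ∀ i j v, memo.get? (i, j) = some v → v = (levP s1 s2 i j : Int)

theorem insert_invB (s1 s2 : List Char) (memo : PySem.Dict (Nat × Nat) Int) (i j : Nat)
    (h : InvB s1 s2 memo) : InvB s1 s2 (memo.insert (i, j) (levP s1 s2 i j : Int)) := by
  intro i' j' v hv
  by_cases he : (i', j') = (i, j)
  · rw [he] at hv
    rw [PySem.Dict.get?_insert_self] at hv
    cases he; cases hv; rfl
  · rw [PySem.Dict.get?_insert_of_ne _ _ he] at hv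
    exact h i' j' v hv

theorem levBgo_correct (s1 s2 : List Char) :
    ∀ (n i j : Nat) (memo : PySem.Dict (Nat × Nat) Int), i + j ≤ n → InvB s1 s2 memo →
      (levBgo s1 s2 i j memo).1 = (levP s1 s2 i j : Int) ∧ InvB s1 s2 (levBgo s1 s2 i j memo).2 := by
  intro n
  induction n with
  | zero =>
    intro i j memo hle hinv
    have hi : i = 0 := by omega
    have hj : j = 0 := by omega
    subst hi; subst hj
    rw [levBgo.eq_def]
    cases hg : memo.get? (0, 0) with
    | some v =>
      dsimp only
      exact ⟨by simpa [levP] using hinv 0 0 v hg, hinv⟩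
    | none =>
      dsimp only
      exact ⟨by simp [levP], by simpa [levP] using insert_invB s1 s2 memo 0 0 hinv⟩
  | succ n ih =>
    intro i j memo hle hinv
    rw [levBgo.eq_def]
    cases hg : memo.get? (i, j) with
    | some v => dsimp only; exact ⟨hinv i j v hg, hinv⟩
    | none =>
      dsimp only
      match i, j with
      | 0, j =>
        dsimp only
        exact ⟨by simp [levP], by simpa [levP] using insert_invB s1 s2 memo 0 j hinv⟩
      | i+1, 0 =>
        dsimp only
        refine ⟨by simp [levP], ?_⟩
        have := insert_invB s1 s2 memo (i+1) 0 hinv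
        simpa [levP] using this
      | i+1, j+1 =>
        dsimp only
        obtain ⟨h1, hm1⟩ := ih i (j+1) memo (by omega) hinv
        obtain ⟨h2, hm2⟩ := ih (i+1) j _ (by omega) hm1
        obtain ⟨h3, hm3⟩ := ih i j _ (by omega) hm2
        have hr : min ((levBgo s1 s2 i (j+1) memo).1 + 1)
            (min ((levBgo s1 s2 (i+1) j (levBgo s1 s2 i (j+1) memo).2).1 + 1)
              ((levBgo s1 s2 i j (levBgo s1 s2 (i+1) j (levBgo s1 s2 i (j+1) memo).2).2).1 +
                (if s1.getD i ' ' = s2.getD j ' ' then (0:Int) else 1))) = (levP s1 s2 (i+1) (j+1) : Int) := by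
          rw [h1, h2, h3, levP]
          split <;> push_cast <;> omega
        constructor
        · exact hr
        · rw [hr]
          exact insert_invB s1 s2 _ (i+1) (j+1) hm3

theorem invB_after (s1 s2 : List Char) (i j : Nat) (memo : PySem.Dict (Nat × Nat) Int)
    (h : InvB s1 s2 memo) : InvB s1 s2 (levBgo s1 s2 i j memo).2 :=
  (levBgo_correct s1 s2 (i + j) i j memo le_rfl h).2

theorem warm_inner_inv (s1 s2 : List Char) (i : Nat) :
    ∀ (js : List Nat) (memo : PySem.Dict (Nat × Nat) Int), InvB s1 s2 memo →
      InvB s1 s2 (js.foldl (fun m j => (levBgo s1 s2 i j m).2) memo) := by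
  intro js
  induction js with
  | nil => intro memo h; exact h
  | cons j t ih => intro memo h; exact ih _ (invB_after s1 s2 i j memo h)

theorem warm_outer_inv (s1 s2 : List Char) :
    ∀ (is : List Nat) (memo : PySem.Dict (Nat × Nat) Int), InvB s1 s2 memo →
      InvB s1 s2 (is.foldl (fun memo i =>
        (List.range (s2.length + 1)).foldl (fun m j => (levBgo s1 s2 i j m).2) memo) memo) := by
  intro is
  induction is with
  | nil => intro memo h; exact h
  | cons i t ih => intro memo h; exact ih _ (warm_inner_inv s1 s2 i _ memo h)

theorem levB_eq_levP (s1 s2 : List Char) :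
    levB s1 s2 = (levP s1 s2 s1.length s2.length : Int) := by
  have hempty : InvB s1 s2 PySem.Dict.empty := by
    intro i j v hv
    rw [PySem.Dict.get?_empty] at hv
    cases hv
  have hwarm := warm_outer_inv s1 s2 (List.range (s1.length + 1)) PySem.Dict.empty hempty
  exact (levBgo_correct s1 s2 (s1.length + s2.length) s1.length s2.length _ (by omega) hwarm).1

-- ----- A's selection fold -----

def stepA (d : String → Int) (st : Option String × Option Int) (c : String) : Option String × Option Int :=
  if ((match st.2 with | none => true | some m => decide (d c < m)) && decide (d c ≤ 2))
  then (some c, some (d c)) else st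

def InvA (d : String → Int) (p : List String) (st : Option String × Option Int) : Prop :=
  (st = (none, none) ∧ ∀ c ∈ p, ¬ d c ≤ 2) ∨
  (∃ b, st = (some b, some (d b)) ∧ b ∈ p ∧ d b ≤ 2 ∧ ∀ c ∈ p, d c ≤ 2 → d b ≤ d c)

theorem stepA_preserves (d : String → Int) (p : List String) (st : Option String × Option Int)
    (x : String) (h : InvA d p st) : InvA d (p ++ [x]) (stepA d st x) := by
  rcases h with ⟨hst, hall⟩ | ⟨b, hst, hb, hb2, hmin⟩
  · subst hst
    by_cases hx : d x ≤ 2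
    · right
      refine ⟨x, ?_, by simp, hx, ?_⟩
      · simp [stepA, hx]
      · intro c hc _
        rcases List.mem_append.mp hc with hc | hc
        · exact absurd (by assumption) (hall c hc)
        · simp at hc; subst hc; omega
    · left
      constructor
      · simp [stepA, hx]
      · intro c hc
        rcases List.mem_append.mp hc with hc | hc
        · exact hall c hc
        · simp at hc; subst hc; exact hx
  · subst hst
    by_cases hcond : d x < d b ∧ d x ≤ 2
    · right
      refine ⟨x, by simp [stepA, hcond.1, hcond.2], by simp, hcond.2, ?_⟩
      intro c hc hc2
      rcases List.mem_append.mp hc with hc | hc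
      · have := hmin c hc hc2; omega
      · simp at hc; subst hc; omega
    · right
      have hstep : stepA d (some b, some (d b)) x = (some b, some (d b)) := by
        simp only [stepA]
        rw [if_neg]
        simp only [Bool.and_eq_true_iff, decide_eq_true_iff]
        omega
      refine ⟨b, hstep, List.mem_append.mpr (Or.inl hb), hb2, ?_⟩
      intro c hc hc2
      rcases List.mem_append.mp hc with hc | hc
      · exact hmin c hc hc2
      · simp at hc; subst hc; omega

theorem foldA_go (d : String → Int) :
    ∀ (l p : List String) (st : Option String × Option Int),
      InvA d p st → InvA d (p ++ l) (l.foldl (stepA d) st) := by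
  intro l
  induction l with
  | nil => intro p st h; simpa using h
  | cons x t ih =>
    intro p st h
    have h2 := ih (p ++ [x]) (stepA d st x) (stepA_preserves d p st x h)
    simpa [List.append_assoc] using h2

theorem foldA_spec (d : String → Int) (l : List String) :
    ((∀ c ∈ l, ¬ d c ≤ 2) ∧ (l.foldl (stepA d) (none, none)).1 = none) ∨
      (∃ b, b ∈ l ∧ d b ≤ 2 ∧ (∀ c ∈ l, d c ≤ 2 → d b ≤ d c) ∧
        (l.foldl (stepA d) (none, none)).1 = some b) := by
  have h := foldA_go d l [] (none, none) (Or.inl ⟨rfl, by simp⟩)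
  rcases h with ⟨hst, hall⟩ | ⟨b, hst, hb, hb2, hmin⟩
  · left; exact ⟨by simpa using hall, by rw [hst]⟩
  · right
    exact ⟨b, by simpa using hb, hb2, by simpa using hmin, by rw [hst]⟩

theorem foldA_spec' (d : String → Int) (l : List String) :
    ((∀ c ∈ l, ¬ d c ≤ 2) ∧
        (l.foldl (fun (st : Option String × Option Int) c =>
          if ((match st.2 with | none => true | some m => decide (d c < m)) && decide (d c ≤ 2))
          then (some c, some (d c)) else st) (none, none)).1 = none) ∨
      (∃ b, b ∈ l ∧ d b ≤ 2 ∧ (∀ c ∈ l, d c ≤ 2 → d b ≤ d c) ∧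
        (l.foldl (fun (st : Option String × Option Int) c =>
          if ((match st.2 with | none => true | some m => decide (d c < m)) && decide (d c ≤ 2))
          then (some c, some (d c)) else st) (none, none)).1 = some b) :=
  foldA_spec d l

-- ----- B's min2? selection -----

theorem min2?_go {α : Type} (k1 : α → Int) (k2 : α → String) :
    ∀ (xs : List α) (a : α) (m : α),
      (xs.foldl (fun acc x =>
        match acc with
        | none => some x
        | some m =>
          if (decide (k1 x < k1 m) || !decide (k1 m < k1 x) && decide (k2 x < k2 m)) = true then some x else some m)
        (some a)) = some m → (m = a ∨ m ∈ xs) ∧ k1 m ≤ k1 a ∧ ∀ x ∈ xs, k1 m ≤ k1 x := by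
  intro xs
  induction xs with
  | nil => intro a m h; simp at h; subst h; simp
  | cons x t ih =>
    intro a m h
    simp only [List.foldl_cons] at h
    by_cases hc : (decide (k1 x < k1 a) || !decide (k1 a < k1 x) && decide (k2 x < k2 a)) = true
    · rw [if_pos hc] at h
      obtain ⟨hm, hle, hall⟩ := ih x m h
      have hxa : k1 x ≤ k1 a := by
        rcases Bool.or_eq_true_iff.mp hc with h1 | h1
        · exact le_of_lt (of_decide_eq_true h1)
        · have := (Bool.and_eq_true_iff.mp h1).1
          simp at this; omega
      refine ⟨?_, by omega, ?_⟩
      · rcases hm with rfl | hm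
        · right; exact List.mem_cons_self
        · right; exact List.mem_cons_of_mem _ hm
      · intro y hy
        rcases List.mem_cons.mp hy with rfl | hy
        · omega
        · exact hall y hy
    · rw [if_neg hc] at h
      obtain ⟨hm, hle, hall⟩ := ih a m h
      have hax : k1 a ≤ k1 x := by
        simp only [Bool.or_eq_true_iff, Bool.and_eq_true_iff] at hc
        push Not at hc
        simp at hc; omega
      refine ⟨?_, hle, ?_⟩
      · rcases hm with rfl | hm
        · left; rfl
        · right; exact List.mem_cons_of_mem _ hm
      · intro y hy
        rcases List.mem_cons.mp hy with rfl | hy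
        · omega
        · exact hall y hy

theorem min2?_spec {α : Type} (xs : List α) (k1 : α → Int) (k2 : α → String) (m : α)
    (h : PySem.List.min2? xs k1 k2 = some m) : m ∈ xs ∧ ∀ x ∈ xs, k1 m ≤ k1 x := by
  cases xs with
  | nil => simp [PySem.List.min2?] at h
  | cons y t =>
    unfold PySem.List.min2? at h
    simp only [List.foldl_cons] at h
    obtain ⟨hm, _, hall⟩ := min2?_go k1 k2 t y m h
    refine ⟨?_, ?_⟩
    · rcases hm with rfl | hm
      · exact List.mem_cons_self
      · exact List.mem_cons_of_mem _ hm
    · intro z hz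
      rcases List.mem_cons.mp hz with rfl | hz
      · obtain ⟨_, hle, _⟩ := min2?_go k1 k2 t z m h; omega
      · exact hall z hz

theorem min2?_ne_none {α : Type} (xs : List α) (hne : xs ≠ []) (k1 : α → Int) (k2 : α → String) :
    PySem.List.min2? xs k1 k2 ≠ none := by
  cases xs with
  | nil => exact absurd rfl hne
  | cons x t =>
    unfold PySem.List.min2?
    simp only [List.foldl_cons]
    suffices h : ∀ (l : List α) (a : α), (l.foldl (fun acc x =>
          match acc with
          | none => some x
          | some m =>
            if (decide (k1 x < k1 m) || !decide (k1 m < k1 x) && decide (k2 x < k2 m)) = true then some x else some m)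
          (some a)) ≠ none by exact h t x
    intro l
    induction l with
    | nil => simp
    | cons y t' ih => intro a; simp only [List.foldl_cons]; split <;> apply ih

theorem two_mem_countP_le_one {l : List String} {p : String → Bool} {a b : String}
    (ha : a ∈ l) (hb : b ∈ l) (hpa : p a) (hpb : p b) (h : l.countP p ≤ 1) : a = b := by
  by_contra hne
  have ha' : a ∈ l.filter p := List.mem_filter.mpr ⟨ha, hpa⟩
  have hb' : b ∈ (l.filter p).erase a := (List.mem_erase_of_ne (Ne.symm hne)).mpr (List.mem_filter.mpr ⟨hb, hpb⟩)
  have h1 : 1 ≤ ((l.filter p).erase a).length := List.length_pos_of_mem hb'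
  have h2 : ((l.filter p).erase a).length = (l.filter p).length - 1 := List.length_erase_of_mem ha'
  have h3 : l.countP p = (l.filter p).length := List.countP_eq_length_filter
  omega

-- ----- assembly -----

theorem cwSorted_perm_A : cwSorted.Perm commonWordsA := by decide

theorem cwSorted_perm_B : cwSorted.Perm commonWordsB := by decide

theorem cwSorted_le_pairwise : List.Pairwise (fun a b => a ≤ b) cwSorted := by
  simp [String.le_iff_toList_le]
  decide

theorem sorted_B_eq : PySem.List.sorted commonWordsB (fun w => w) false = cwSorted :=
  PySem.List.sorted_id_eq_of_perm_of_pairwise _ _ cwSorted_perm_B cwSorted_le_pairwise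

-- ===== VERDICT (by name: the statement is the Claim_ definition above) =====
theorem autocorrect_word_spec : Claim_equal_autocorrect_word := by
  intro word hdom hpre
  unfold Spec_autocorrect_word
  by_cases hnil : word = []
  · simp [autocorrect_word, autocorrect_word_alt, hnil]
  · unfold autocorrect_word autocorrect_word_alt
    rw [if_neg hnil, if_neg hnil]
    dsimp only
    generalize hgen : PySem.Str.join "" word = w
    unfold Pre_autocorrect_word at hpre
    rw [hgen] at hpre
    by_cases hmem : w ∈ cwSorted
    · have hA : commonWordsA.contains w = true := List.contains_iff_mem.mpr (cwSorted_perm_A.mem_iff.mp hmem)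
      have hB : commonWordsB.contains w = true := List.contains_iff_mem.mpr (cwSorted_perm_B.mem_iff.mp hmem)
      rw [if_pos hA, if_pos hB]
    · have hA : ¬ commonWordsA.contains w = true := by
        simp only [List.contains_iff_mem]
        exact fun h => hmem (cwSorted_perm_A.mem_iff.mpr h)
      have hB : ¬ commonWordsB.contains w = true := by
        simp only [List.contains_iff_mem]
        exact fun h => hmem (cwSorted_perm_B.mem_iff.mpr h)
      rw [if_neg hA, if_neg hB, sorted_B_eq]
      -- both distances are the reference wdist (as integers)
      have hAw : ∀ c : String, levA w.toList c.toList = (wdist w c : Int) := by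
        intro c; rw [levA_eq_levP, wdist, editDist_eq_levP]
      have hBw : ∀ c : String, levB w.toList c.toList = (wdist w c : Int) := by
        intro c; rw [levB_eq_levP, wdist, editDist_eq_levP]
      -- the precondition: at most one global minimizer with distance ≤ 2
      have hcount : cwSorted.countP (fun c => decide (wdist w c ≤ 2) &&
          cwSorted.all (fun c' => decide (wdist w c ≤ wdist w c'))) ≤ 1 := by
        rcases hpre with h | h
        · exact absurd h hmem
        · exact h
      rcases foldA_spec' (fun c => levA w.toList c.toList) commonWordsA with
        ⟨hnone, hfold⟩ | ⟨b1, hb1mem, hb12, hb1min, hfold⟩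
      · rw [hfold]
        cases hmin : PySem.List.min2? (cwSorted.map (fun c => (levB w.toList c.toList, c)))
            (fun p => p.1) (fun p => p.2) with
        | none => rfl
        | some p =>
          obtain ⟨hpmem, hpmin⟩ := min2?_spec _ _ _ _ hmin
          obtain ⟨b2, hb2mem, hb2eq⟩ := List.mem_map.mp hpmem
          have hnb2 : ¬ levA w.toList b2.toList ≤ 2 := hnone b2 (cwSorted_perm_A.mem_iff.mp hb2mem)
          rw [← hb2eq]
          have : ¬ levB w.toList b2.toList ≤ 2 := by rw [hBw]; rw [hAw] at hnb2; exact hnb2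
          simp only [if_neg this]
      · rw [hfold]
        cases hmin : PySem.List.min2? (cwSorted.map (fun c => (levB w.toList c.toList, c)))
            (fun p => p.1) (fun p => p.2) with
        | none =>
          exact absurd hmin (min2?_ne_none _ (by simp [cwSorted]) _ _)
        | some p =>
          obtain ⟨hpmem, hpmin⟩ := min2?_spec _ _ _ _ hmin
          obtain ⟨b2, hb2mem, hb2eq⟩ := List.mem_map.mp hpmem
          have hb1cw : b1 ∈ cwSorted := cwSorted_perm_A.mem_iff.mpr hb1mem
          -- Nat-level facts
          have hb12' : wdist w b1 ≤ 2 := by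
            have := hb12; rw [hAw] at this; exact_mod_cast this
          have hmin21 : wdist w b2 ≤ wdist w b1 := by
            have h1 := hpmin (levB w.toList b1.toList, b1) (List.mem_map.mpr ⟨b1, hb1cw, rfl⟩)
            rw [← hb2eq] at h1
            simp only at h1
            rw [hBw, hBw] at h1
            exact_mod_cast h1
          have hb22' : wdist w b2 ≤ 2 := le_trans hmin21 hb12'
          have hminall : ∀ c' ∈ cwSorted, wdist w b2 ≤ wdist w c' := by
            intro c' hc'
            have h1 := hpmin (levB w.toList c'.toList, c') (List.mem_map.mpr ⟨c', hc', rfl⟩)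
            rw [← hb2eq] at h1
            simp only at h1
            rw [hBw, hBw] at h1
            exact_mod_cast h1
          have hb1all : ∀ c' ∈ cwSorted, wdist w b1 ≤ wdist w c' := by
            intro c' hc'
            by_cases hc2 : wdist w c' ≤ 2
            · have := hb1min c' (cwSorted_perm_A.mem_iff.mp hc') (by rw [hAw]; exact_mod_cast hc2)
              rw [hAw, hAw] at this
              exact_mod_cast this
            · omega
          have hq : ∀ b, b ∈ cwSorted → wdist w b ≤ 2 → (∀ c' ∈ cwSorted, wdist w b ≤ wdist w c') →
              (fun c => decide (wdist w c ≤ 2) &&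
                cwSorted.all (fun c' => decide (wdist w c ≤ wdist w c'))) b = true := by
            intro b _ hble hball
            simp only [Bool.and_eq_true_iff, decide_eq_true_iff, List.all_eq_true]
            exact ⟨hble, fun c' hc' => hball c' hc'⟩
          have hb1b2 : b1 = b2 :=
            two_mem_countP_le_one hb1cw hb2mem
              (hq b1 hb1cw hb12' hb1all) (hq b2 hb2mem hb22' hminall) hcount
          rw [← hb2eq]
          have hle2 : levB w.toList b2.toList ≤ 2 := by rw [hBw]; exact_mod_cast hb22'
          simp only [if_pos hle2, hb1b2]
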